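-- pv_equiv track=rewrite | github.com/Lukas1930/NLP | transformer_models.py | separate_special_characters_with_labels
-- ===== SOURCE A (Python) =====
-- def separate_special_characters_with_labels(sentences, sentence_labels):
--     result_sentences = []
--     result_sentence_labels = []
--
--     for words, labels in zip(sentences, sentence_labels):
--         result_words = []
--         result_labels = []
--
--         for word, label in zip(words, labels):
--             # Check if the word contains '-' or '\''
--             if '-' in word or '\'' in word or '.' in word or (MODEL != "geckos/deberta-base-fine-tuned-ner" and ',' in word) or ':' in word or '/' in word or '$' in word or ')' in word or '(' in word or '=' in word or '*' in word or '+' in word or '#' in word or '&' in word: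
--                 # Split the word by both '-' and '\'' and preserve the separators
--                 parts = []
--                 temp = [word]
--                 for separator in ('-', '\'', '.', ',', ':', '/', '$', ')', '(', '=', '*', '+', '#', '&'):
--                     for split_word in temp:
--                         expanded = split_word.split(separator)
--                         parts.extend([piece if i == len(expanded) - 1 else piece + separator for i, piece in enumerate(expanded)])
--                     temp = parts
--                     parts = []
--
--                 # Add parts to the result, treating separators as separate tokens
--                 for i, part in enumerate(temp):
--                     if part.endswith('-') or part.endswith('\'') or part.endswith('.') or part.endswith(',') or part.endswith(':') or part.endswith('/') or part.endswith('$') or part.endswith(')') or part.endswith('(') or part.endswith('=') or part.endswith('*') or part.endswith('+') or part.endswith('#') or part.endswith('&'):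
--                         part = part[:-1]  # Remove the separator at the end for processing
--                         if part:
--                             result_words.append(part)
--                             result_labels.append(label if i == 0 else ('I' + label[1:] if label.startswith('B') else label))
--                         result_words.append(temp[i][-1])  # Add the separator as a separate token
--                         result_labels.append('O')  # Assuming 'O' as the label for separators
--                     else:
--                         if part:
--                             result_words.append(part)
--                             result_labels.append(label if i == 0 else ('I' + label[1:] if label.startswith('B') else label))
--             else:
--                 result_words.append(word)
--                 result_labels.append(label)
--
--         result_sentences.append(result_words)
--         result_sentence_labels.append(result_labels)
--
--     return result_sentences, result_sentence_labels
--
-- MODEL = "dslim/bert-base-NER"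
-- ===== SOURCE B (Python) =====
-- MODEL = "dslim/bert-base-NER"
--
-- SEPARATORS = "-'.,:/$)(=*+#&"
--
-- def separate_special_characters_with_labels(sentences, sentence_labels):
--     # ',' only participates in the outer guard when MODEL is not the geckos model,
--     # but the splitting itself always uses the full separator set (as in the original).
--     guard_seps = set(SEPARATORS) if MODEL != "geckos/deberta-base-fine-tuned-ner" else set(SEPARATORS) - {','}
--     sep_set = set(SEPARATORS)
--     result_sentences = []
--     result_sentence_labels = []
--     for words, labels in zip(sentences, sentence_labels):
--         rw, rl = [], []
--         for word, label in zip(words, labels):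
--             if not any(ch in guard_seps for ch in word):
--                 rw.append(word)
--                 rl.append(label)
--                 continue
--             relabel = 'I' + label[1:] if label.startswith('B') else label
--             buf = []
--             chunk = 0
--             for ch in word:
--                 if ch in sep_set:
--                     if buf:
--                         rw.append(''.join(buf))
--                         rl.append(label if chunk == 0 else relabel)
--                         buf = []
--                     rw.append(ch)
--                     rl.append('O')
--                     chunk += 1
--                 else:
--                     buf.append(ch)
--             if buf:
--                 rw.append(''.join(buf))
--                 rl.append(label if chunk == 0 else relabel)
--         result_sentences.append(rw)
--         result_sentence_labels.append(rl)
--     return result_sentences, result_sentence_labels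
-- ===== Notes on version B (the rewrite author's own statement) =====
-- stated objective: alternative
-- what changed: Replaces A's fourteen sequential split-and-reassemble passes (plus a final endswith/slice pass over the parts) per word by a single left-to-right character scan that buffers non-separator characters and emits content and separator tokens directly, counting separators for the B->I relabelling.
import Mathlib
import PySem

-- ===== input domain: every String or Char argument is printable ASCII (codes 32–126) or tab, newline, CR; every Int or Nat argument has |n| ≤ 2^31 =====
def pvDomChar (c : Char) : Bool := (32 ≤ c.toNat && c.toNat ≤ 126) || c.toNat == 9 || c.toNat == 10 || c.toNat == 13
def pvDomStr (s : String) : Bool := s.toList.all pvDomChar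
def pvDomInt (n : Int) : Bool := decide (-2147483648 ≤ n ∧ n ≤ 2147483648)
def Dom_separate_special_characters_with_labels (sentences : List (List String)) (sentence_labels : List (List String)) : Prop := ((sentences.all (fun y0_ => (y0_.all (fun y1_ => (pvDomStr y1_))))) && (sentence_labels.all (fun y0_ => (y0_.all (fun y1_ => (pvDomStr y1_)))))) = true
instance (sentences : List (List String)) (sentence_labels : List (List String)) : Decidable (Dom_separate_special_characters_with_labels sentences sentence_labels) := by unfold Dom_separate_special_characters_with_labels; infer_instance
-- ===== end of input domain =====

-- B replaces A's fourteen sequential split-and-reassemble passes per word by a single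
-- left-to-right character scan emitting content and separator tokens directly (objective: alternative single-pass algorithm, same cost).

-- ===== PORT A =====
def MODEL : String := "dslim/bert-base-NER"

def aGuard (word : String) : Bool :=
  PySem.Str.isIn "-" word || PySem.Str.isIn "'" word || PySem.Str.isIn "." word ||
  (!(MODEL == "geckos/deberta-base-fine-tuned-ner") && PySem.Str.isIn "," word) ||
  PySem.Str.isIn ":" word || PySem.Str.isIn "/" word || PySem.Str.isIn "$" word ||
  PySem.Str.isIn ")" word || PySem.Str.isIn "(" word || PySem.Str.isIn "=" word ||
  PySem.Str.isIn "*" word || PySem.Str.isIn "+" word || PySem.Str.isIn "#" word ||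
  PySem.Str.isIn "&" word

def aSepStrings : List String := ["-", "'", ".", ",", ":", "/", "$", ")", "(", "=", "*", "+", "#", "&"]

-- split_word.split(separator) with the trailing-separator comprehension; separator ≠ "" so split? is `some`
def aSplitKeep (separator : String) (split_word : String) : List String :=
  let expanded := (PySem.Str.split? split_word separator).getD []
  (PySem.List.enumerate expanded).map (fun ip =>
    if ip.1 == (expanded.length : Int) - 1 then ip.2
    else String.ofList (ip.2.toList ++ separator.toList))  -- piece + separator (string concat, exact)

def aTemp (word : String) : List String :=
  aSepStrings.foldl (fun temp separator =>
    temp.foldl (fun parts split_word => parts ++ aSplitKeep separator split_word) []) [word]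

def aLabelFor (label : String) (i : Int) : String :=
  if i == 0 then label
  else if PySem.Str.startswith label "B"
    then String.ofList ('I' :: (PySem.Str.slice label (some 1) none).toList)  -- 'I' + label[1:]
    else label

def aEndsSep (part : String) : Bool :=
  PySem.Str.endswith part "-" || PySem.Str.endswith part "'" || PySem.Str.endswith part "." ||
  PySem.Str.endswith part "," || PySem.Str.endswith part ":" || PySem.Str.endswith part "/" ||
  PySem.Str.endswith part "$" || PySem.Str.endswith part ")" || PySem.Str.endswith part "(" ||
  PySem.Str.endswith part "=" || PySem.Str.endswith part "*" || PySem.Str.endswith part "+" ||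
  PySem.Str.endswith part "#" || PySem.Str.endswith part "&"

-- one iteration of A's output loop; ip.2 is the enumerate element, i.e. temp[ip.1]
def aEmitChunk (label : String) (st : List String × List String) (ip : Int × String) : List String × List String :=
  if aEndsSep ip.2 then
    let part := PySem.Str.slice ip.2 none (some (-1))      -- part[:-1]
    let st1 := if part ≠ "" then (st.1 ++ [part], st.2 ++ [aLabelFor label ip.1]) else st
    -- temp[i][-1]: ip.2 ends with a separator here, so the IndexError branch (none) is unreachable
    let sepTok := match PySem.Str.pyGet? ip.2 (-1) with
      | some ch => String.ofList [ch]
      | none => ""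
    (st1.1 ++ [sepTok], st1.2 ++ ["O"])
  else if ip.2 ≠ "" then (st.1 ++ [ip.2], st.2 ++ [aLabelFor label ip.1]) else st

def aWordStep (st : List String × List String) (wl : String × String) : List String × List String :=
  if aGuard wl.1 then (PySem.List.enumerate (aTemp wl.1)).foldl (aEmitChunk wl.2) st
  else (st.1 ++ [wl.1], st.2 ++ [wl.2])

def aSentStep (st : List (List String) × List (List String)) (wls : List String × List String) :
    List (List String) × List (List String) :=
  let inner := (wls.1.zip wls.2).foldl aWordStep ([], [])
  (st.1 ++ [inner.1], st.2 ++ [inner.2])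

def separate_special_characters_with_labels (sentences : List (List String)) (sentence_labels : List (List String)) : List (List String) × List (List String) :=
  (sentences.zip sentence_labels).foldl aSentStep ([], [])

-- ===== PORT B =====
def SEPARATORS : String := "-'.,:/$)(=*+#&"

-- set(SEPARATORS) resp. set(SEPARATORS) - {','}; set difference ported as a filter over the set's elements (exact)
def bGuardSeps : List Char :=
  if !(MODEL == "geckos/deberta-base-fine-tuned-ner") then PySem.Set.ofList SEPARATORS.toList
  else (PySem.Set.ofList SEPARATORS.toList).filter (fun ch => !(ch == ','))

def bSepSet : List Char := PySem.Set.ofList SEPARATORS.toList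

def bRelabel (label : String) : String :=
  if PySem.Str.startswith label "B"
    then String.ofList ('I' :: (PySem.Str.slice label (some 1) none).toList)  -- 'I' + label[1:]
    else label

-- one character of B's scan; state = ((rw, rl), buf, chunk)
def bCharStep (label relabel : String) (st : (List String × List String) × List Char × Nat) (ch : Char) :
    (List String × List String) × List Char × Nat :=
  match st with
  | ((rw, rl), buf, chunk) =>
    if bSepSet.contains ch then
      let p := if buf ≠ [] then (rw ++ [String.ofList buf], rl ++ [if chunk == 0 then label else relabel]) else (rw, rl)
      ((p.1 ++ [String.ofList [ch]], p.2 ++ ["O"]), [], chunk + 1)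
    else ((rw, rl), buf ++ [ch], chunk)

-- the trailing `if buf:` flush
def bFlush (label relabel : String) (res : (List String × List String) × List Char × Nat) : List String × List String :=
  if res.2.1 ≠ [] then (res.1.1 ++ [String.ofList res.2.1], res.1.2 ++ [if res.2.2 == 0 then label else relabel])
  else res.1

def bWordStep (st : List String × List String) (wl : String × String) : List String × List String :=
  if !(wl.1.toList.any (fun ch => bGuardSeps.contains ch)) then (st.1 ++ [wl.1], st.2 ++ [wl.2])
  else
    let relabel := bRelabel wl.2
    bFlush wl.2 relabel (wl.1.toList.foldl (bCharStep wl.2 relabel) ((st.1, st.2), [], 0))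

def bSentStep (st : List (List String) × List (List String)) (wls : List String × List String) :
    List (List String) × List (List String) :=
  let inner := (wls.1.zip wls.2).foldl bWordStep ([], [])
  (st.1 ++ [inner.1], st.2 ++ [inner.2])

def separate_special_characters_with_labels_alt (sentences : List (List String)) (sentence_labels : List (List String)) : List (List String) × List (List String) :=
  (sentences.zip sentence_labels).foldl bSentStep ([], [])

-- ===== PRECONDITION & SPEC =====
def Spec_separate_special_characters_with_labels (sentences : List (List String)) (sentence_labels : List (List String)) (out : List (List String) × List (List String)) : Prop := out = separate_special_characters_with_labels_alt sentences sentence_labels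
instance (sentences : List (List String)) (sentence_labels : List (List String)) (out : List (List String) × List (List String)) : Decidable (Spec_separate_special_characters_with_labels sentences sentence_labels out) := by unfold Spec_separate_special_characters_with_labels; infer_instance

-- ===== CLAIM (what is proved, stated in full; the proofs are below) =====
def Claim_equal_separate_special_characters_with_labels : Prop := ∀ (sentences : List (List String)) (sentence_labels : List (List String)), Dom_separate_special_characters_with_labels sentences sentence_labels → Spec_separate_special_characters_with_labels sentences sentence_labels (separate_special_characters_with_labels sentences sentence_labels)

-- ===== LEMMAS AND PROOFS =====

def tokP (P : Char → Bool) : List Char → List (List Char)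
  | [] => [[]]
  | a :: rest => if P a then [a] :: tokP P rest else (tokP P rest).modifyHead (a :: ·)
def splitC (c : Char) : List Char → List (List Char)
  | [] => [[]]
  | a :: rest => if a = c then [] :: splitC c rest else (splitC c rest).modifyHead (a :: ·)
def keepLast {α : Type} (f : α → α) : List α → List α
  | [] => []
  | [x] => [x]
  | x :: y :: t => f x :: keepLast f (y :: t)

theorem tokP_ne_nil (P : Char → Bool) (l : List Char) : tokP P l ≠ [] := by
  induction l with
  | nil => simp [tokP]
  | cons a r ih =>
    simp only [tokP]
    split
    · simp
    · cases h : tokP P r with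
      | nil => exact absurd h ih
      | cons x t => simp

theorem splitC_ne_nil (c : Char) (l : List Char) : splitC c l ≠ [] := by
  induction l with
  | nil => simp [splitC]
  | cons a r ih =>
    simp only [splitC]
    split
    · simp
    · cases h : splitC c r with
      | nil => exact absurd h ih
      | cons x t => simp

theorem tokP_congr {P Q : Char → Bool} (h : ∀ a, P a = Q a) (l : List Char) : tokP P l = tokP Q l := by
  induction l with
  | nil => rfl
  | cons a r ih => simp only [tokP, h a, ih]

theorem tokP_false (l : List Char) : tokP (fun _ => false) l = [l] := by
  induction l with
  | nil => rfl
  | cons a r ih => simp [tokP, ih]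

theorem keepLast_splitC (c : Char) (l : List Char) :
    keepLast (· ++ [c]) (splitC c l) = tokP (· == c) l := by
  induction l with
  | nil => rfl
  | cons a r ih =>
    simp only [splitC, tokP]
    by_cases hac : a = c
    · subst hac
      simp only [if_pos rfl, BEq.rfl, if_pos]
      cases h : splitC a r with
      | nil => exact absurd h (splitC_ne_nil a r)
      | cons x t =>
        rw [h] at ih
        simp [keepLast]
        cases t with
        | nil => simpa [keepLast] using ih
        | cons y t' => simpa [keepLast] using ih
    · rw [if_neg hac, if_neg (by simp [hac])]
      cases h : splitC c r with
      | nil => exact absurd h (splitC_ne_nil c r)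
      | cons x t =>
        rw [h] at ih
        cases t with
        | nil =>
          simp [keepLast] at ih ⊢
          rw [← ih]
          simp
        | cons y t' =>
          simp [keepLast] at ih ⊢
          rw [← ih]
          simp [keepLast]

theorem enumerate_nil {α : Type} (k : Int) : PySem.List.enumerate ([] : List α) k = [] := by
  simp [PySem.List.enumerate]

theorem enumerate_cons {α : Type} (x : α) (xs : List α) (k : Int) :
    PySem.List.enumerate (x :: xs) k = (k, x) :: PySem.List.enumerate xs (k + 1) := by
  simp [PySem.List.enumerate]

theorem enum_keepLast {α : Type} (f : α → α) :
    ∀ (e : List α) (k m : Int), k + e.length - 1 = m →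
    (PySem.List.enumerate e k).map (fun ip => if ip.1 == m then ip.2 else f ip.2) = keepLast f e := by
  intro e
  induction e with
  | nil => intro k m _; simp [enumerate_nil, keepLast]
  | cons x xs ih =>
    intro k m hm
    rw [enumerate_cons]
    cases xs with
    | nil =>
      have : k = m := by simp at hm; omega
      simp [enumerate_nil, keepLast, this]
    | cons y t =>
      have hne : ¬ (k == m) = true := by
        simp only [List.length_cons] at hm
        simp only [beq_iff_eq]
        omega
      simp only [List.map_cons, hne]
      rw [ih (k+1) m (by simp at hm ⊢; push_cast; omega)]
      simp [keepLast]

theorem modifyHead_append {α : Type} (f : α → α) (xs ys : List α) (h : xs ≠ []) :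
    xs.modifyHead f ++ ys = (xs ++ ys).modifyHead f := by
  cases xs with
  | nil => exact absurd rfl h
  | cons a t => simp

theorem flatMap_tokP (P : Char → Bool) (c : Char) (hc : P c = false) (l : List Char) :
    (tokP P l).flatMap (tokP (· == c)) = tokP (fun a => P a || a == c) l := by
  induction l with
  | nil => simp [tokP]
  | cons a r ih =>
    simp only [tokP]
    by_cases hPa : P a = true
    · have hac : ¬ (a == c) = true := by
        intro h; rw [beq_iff_eq] at h; subst h; simp [hPa] at hc
      rw [if_pos hPa, if_pos (by simp [hPa])]
      simp only [List.flatMap_cons]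
      rw [ih]
      have : tokP (· == c) [a] = [[a]] := by simp [tokP, hac]
      rw [this]
      rfl
    · have hPa' : P a = false := by simpa using hPa
      by_cases hac : a = c
      · subst hac
        rw [if_neg (by simp [hPa']), if_pos (by simp)]
        cases h : tokP P r with
        | nil => exact absurd h (tokP_ne_nil P r)
        | cons t ts =>
          rw [h] at ih
          simp only [List.modifyHead_cons, List.flatMap_cons]
          have h1 : tokP (· == a) (a :: t) = [a] :: tokP (· == a) t := by simp [tokP]
          rw [h1]
          simpa using ih
      · rw [if_neg (by simp [hPa', hac]), if_neg (by simp [hPa', hac])]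
        cases h : tokP P r with
        | nil => exact absurd h (tokP_ne_nil P r)
        | cons t ts =>
          rw [h] at ih
          simp only [List.modifyHead_cons, List.flatMap_cons]
          have h1 : tokP (· == c) (a :: t) = (tokP (· == c) t).modifyHead (a :: ·) := by
            simp [tokP, hac]
          rw [h1, modifyHead_append _ _ _ (tokP_ne_nil _ t)]
          rw [show (tokP (· == c) t ++ ts.flatMap (tokP (· == c))) = (t :: ts).flatMap (tokP (· == c)) from by simp]
          rw [ih]

theorem splitOn_go_single (c : Char) :
    ∀ (fuel : Nat) (l cur : List Char) (acc : List (List Char)), l.length ≤ fuel →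
    PySem.Chars.splitOn.go [c] fuel l cur acc
      = acc.reverse ++ (splitC c l).modifyHead (cur.reverse ++ ·) := by
  intro fuel
  induction fuel with
  | zero =>
    intro l cur acc h
    have : l = [] := by cases l with | nil => rfl | cons a t => simp at h
    subst this
    simp [PySem.Chars.splitOn.go, splitC]
  | succ fuel ih =>
    intro l cur acc h
    cases l with
    | nil => simp [PySem.Chars.splitOn.go, splitC]
    | cons a rest =>
      simp only [PySem.Chars.splitOn.go]
      by_cases hac : c = a
      · subst hac
        rw [if_pos (by simp [List.isPrefixOf])]
        rw [show List.drop [c].length (c :: rest) = rest from by simp]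
        rw [ih rest [] ((cur.reverse :: acc)) (by simpa using h)]
        simp [splitC]
        cases hsp : splitC c rest with
        | nil => exact absurd hsp (splitC_ne_nil c rest)
        | cons t ts => simp
      · rw [if_neg (by simp [List.isPrefixOf]; intro hh; exact absurd hh hac)]
        rw [ih rest (a :: cur) acc (by simpa using h)]
        simp only [splitC]
        rw [if_neg (fun hh => hac hh.symm)]
        cases hsp : splitC c rest with
        | nil => exact absurd hsp (splitC_ne_nil c rest)
        | cons t ts => simp

theorem splitOn_single (c : Char) (l : List Char) : PySem.Chars.splitOn l [c] = splitC c l := by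
  unfold PySem.Chars.splitOn
  rw [splitOn_go_single c (l.length + 1) l [] [] (by omega)]
  cases hsp : splitC c l with
  | nil => exact absurd hsp (splitC_ne_nil c l)
  | cons t ts => simp

def pvSeps : List Char := ['-', '\'', '.', ',', ':', '/', '$', ')', '(', '=', '*', '+', '#', '&']

theorem enumerate_map {α β : Type} (f : α → β) (l : List α) (k : Int) :
    PySem.List.enumerate (l.map f) k = (PySem.List.enumerate l k).map (fun ip => (ip.1, f ip.2)) := by
  induction l generalizing k with
  | nil => simp [PySem.List.enumerate]
  | cons x xs ih => simp [PySem.List.enumerate, ih]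

theorem aSplitKeep_toList (c : Char) (s sw : String) (hs : s.toList = [c]) :
    (aSplitKeep s sw).map String.toList = tokP (· == c) sw.toList := by
  have hs' : ¬ s = "" := by intro h; subst h; simp at hs
  have hsplit : PySem.Str.split? sw s = some ((splitC c sw.toList).map String.ofList) := by
    simp [PySem.Str.split?, PySem.Chars.split?, hs, hs', splitOn_single]
  unfold aSplitKeep
  rw [hsplit]
  simp only [Option.getD_some]
  rw [enumerate_map]
  rw [List.map_map, List.map_map]
  have hlen : ((splitC c sw.toList).map String.ofList).length = (splitC c sw.toList).length := by simp
  rw [← keepLast_splitC c sw.toList]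
  rw [← enum_keepLast (· ++ [c]) (splitC c sw.toList) 0 ((splitC c sw.toList).length - 1) (by push_cast; omega)]
  apply List.map_congr_left
  intro ip hip
  simp only [hs, hlen]
  rcases eq_or_ne ip.1 (((splitC c sw.toList).length : Int) - 1) with hI | hI <;> simp [hI]

theorem foldl_flatMap_tokP :
    ∀ (todo done : List Char) (l : List Char), (done ++ todo).Nodup →
    todo.foldl (fun tl c => tl.flatMap (tokP (· == c))) (tokP (done.contains ·) l)
      = tokP ((done ++ todo).contains ·) l := by
  intro todo
  induction todo with
  | nil => intro done l _; simp
  | cons c todo' ih =>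
    intro done l hnd
    simp only [List.foldl_cons]
    have hc : done.contains c = false := by
      have hdisj := List.disjoint_of_nodup_append hnd
      have : c ∉ done := fun hm => hdisj hm (by simp)
      simpa using this
    rw [flatMap_tokP _ c hc]
    have hstep : ∀ a, (done.contains a || a == c) = ((done ++ [c]).contains a) := by
      intro a; simp [List.contains_append, Bool.beq_eq_decide_eq]
    rw [tokP_congr hstep]
    have hnd' : ((done ++ [c]) ++ todo').Nodup := by
      rw [List.append_assoc, List.singleton_append]; exact hnd
    rw [ih (done ++ [c]) l hnd']
    apply tokP_congr
    intro a
    rw [List.append_assoc, List.singleton_append]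

theorem ofList_eq_empty_iff (buf : List Char) : String.ofList buf = "" ↔ buf = [] := by
  constructor
  · intro h; have := congrArg String.toList h; simpa using this
  · intro h; subst h; rfl

theorem labelFor_eq (label : String) (k : Nat) :
    aLabelFor label (k : Int) = if k == 0 then label else bRelabel label := by
  by_cases hk : k = 0 <;> simp [aLabelFor, bRelabel, hk]

theorem endswith_concat (buf : List Char) (c : Char) :
    PySem.Chars.endswith (buf ++ [c]) [c] = true := by
  rw [PySem.Chars.endswith_iff]; exact ⟨buf, rfl⟩

theorem endswith_single_false (buf : List Char) (c : Char)
    (h : ∀ b ∈ buf, pvSeps.contains b = false) (hc : pvSeps.contains c = true) :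
    PySem.Chars.endswith buf [c] = false := by
  cases hE : PySem.Chars.endswith buf [c] with
  | false => rfl
  | true =>
    rw [PySem.Chars.endswith_iff] at hE
    have hmem : c ∈ buf := hE.mem (by simp)
    rw [h c hmem] at hc
    exact absurd hc (by simp)

theorem endsSep_false (buf : List Char) (h : ∀ b ∈ buf, pvSeps.contains b = false) :
    aEndsSep (String.ofList buf) = false := by
  simp only [aEndsSep, PySem.Str.endswith_eq, String.toList_ofList, show ("-" : String).toList = ['-'] from rfl, show ("'" : String).toList = ['\''] from rfl, show ("." : String).toList = ['.'] from rfl, show ("," : String).toList = [','] from rfl, show (":" : String).toList = [':'] from rfl, show ("/" : String).toList = ['/'] from rfl, show ("$" : String).toList = ['$'] from rfl, show (")" : String).toList = [')'] from rfl, show ("(" : String).toList = ['('] from rfl, show ("=" : String).toList = ['='] from rfl, show ("*" : String).toList = ['*'] from rfl, show ("+" : String).toList = ['+'] from rfl, show ("#" : String).toList = ['#'] from rfl, show ("&" : String).toList = ['&'] from rfl]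
  rw [endswith_single_false buf '-' h (by decide), endswith_single_false buf '\'' h (by decide),
    endswith_single_false buf '.' h (by decide), endswith_single_false buf ',' h (by decide),
    endswith_single_false buf ':' h (by decide), endswith_single_false buf '/' h (by decide),
    endswith_single_false buf '$' h (by decide), endswith_single_false buf ')' h (by decide),
    endswith_single_false buf '(' h (by decide), endswith_single_false buf '=' h (by decide),
    endswith_single_false buf '*' h (by decide), endswith_single_false buf '+' h (by decide),
    endswith_single_false buf '#' h (by decide), endswith_single_false buf '&' h (by decide)]
  rfl

theorem endsSep_true (buf : List Char) (c : Char) (hc : pvSeps.contains c = true) :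
    aEndsSep (String.ofList (buf ++ [c])) = true := by
  have hmem : c ∈ pvSeps := by simpa using hc
  simp only [aEndsSep, PySem.Str.endswith_eq, String.toList_ofList, show ("-" : String).toList = ['-'] from rfl, show ("'" : String).toList = ['\''] from rfl, show ("." : String).toList = ['.'] from rfl, show ("," : String).toList = [','] from rfl, show (":" : String).toList = [':'] from rfl, show ("/" : String).toList = ['/'] from rfl, show ("$" : String).toList = ['$'] from rfl, show (")" : String).toList = [')'] from rfl, show ("(" : String).toList = ['('] from rfl, show ("=" : String).toList = ['='] from rfl, show ("*" : String).toList = ['*'] from rfl, show ("+" : String).toList = ['+'] from rfl, show ("#" : String).toList = ['#'] from rfl, show ("&" : String).toList = ['&'] from rfl]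
  simp only [pvSeps, List.mem_cons, List.not_mem_nil, or_false] at hmem
  rcases hmem with rfl|rfl|rfl|rfl|rfl|rfl|rfl|rfl|rfl|rfl|rfl|rfl|rfl|rfl <;>
    simp [endswith_concat buf]

theorem aTemp_aux :
    ∀ (ss : List String) (cs : List Char), ss.map String.toList = cs.map (fun c => [c]) →
    ∀ temp : List String,
    (ss.foldl (fun temp sep => temp.foldl (fun parts sw => parts ++ aSplitKeep sep sw) []) temp).map String.toList
      = cs.foldl (fun tl c => tl.flatMap (tokP (· == c))) (temp.map String.toList) := by
  intro ss
  induction ss with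
  | nil =>
    intro cs h temp
    cases cs with
    | nil => simp
    | cons c cs' => simp at h
  | cons s ss' ih =>
    intro cs h temp
    cases cs with
    | nil => simp at h
    | cons c cs' =>
      simp only [List.map_cons, List.cons.injEq] at h
      simp only [List.foldl_cons]
      rw [ih cs' h.2]
      congr 1
      rw [PySem.List.foldl_append_eq_flatMap (aSplitKeep s) temp []]
      simp only [List.nil_append, List.map_flatMap]
      rw [List.flatMap_map]
      congr 1
      funext sw
      exact aSplitKeep_toList c s sw h.1

theorem aTemp_toList (w : String) :
    (aTemp w).map String.toList = tokP (pvSeps.contains ·) w.toList := by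
  unfold aTemp
  rw [aTemp_aux aSepStrings pvSeps (by decide) [w]]
  have h0 : ([w].map String.toList) = tokP (([] : List Char).contains ·) w.toList := by
    rw [show (([] : List Char).contains ·) = (fun _ => false) from rfl, tokP_false]
    simp
  rw [h0, foldl_flatMap_tokP pvSeps [] w.toList (by simpa using (by decide : pvSeps.Nodup))]
  simp

theorem aTemp_eq (w : String) :
    aTemp w = (tokP (pvSeps.contains ·) w.toList).map String.ofList := by
  have h := aTemp_toList w
  have := congrArg (List.map String.ofList) h
  rw [List.map_map] at this
  rw [← this]
  simp [List.map_id'']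

theorem bSep_eq' : bSepSet = pvSeps := by decide

theorem slice_concat' (buf : List Char) (c : Char) :
    PySem.Str.slice (String.ofList (buf ++ [c])) none (some (-1)) = String.ofList buf := by
  apply String.ext
  rw [PySem.Str.slice_to_neg_one]
  simp

theorem pyget_concat' (buf : List Char) (c : Char) :
    PySem.Str.pyGet? (String.ofList (buf ++ [c])) (-1) = some c := by
  simp [PySem.Str.pyGet?, PySem.List.pyGet?_neg_one]

theorem emit_sep_chunk (label relabel : String) (hrel : relabel = bRelabel label)
    (st : List String × List String) (buf : List Char) (c : Char) (k : Nat)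
    (hS : pvSeps.contains c = true) :
    aEmitChunk label st ((k : Int), String.ofList (buf ++ [c]))
      = ((if buf ≠ [] then (st.1 ++ [String.ofList buf], st.2 ++ [if k == 0 then label else relabel]) else (st.1, st.2)).1
           ++ [String.ofList [c]],
         (if buf ≠ [] then (st.1 ++ [String.ofList buf], st.2 ++ [if k == 0 then label else relabel]) else (st.1, st.2)).2
           ++ ["O"]) := by
  unfold aEmitChunk
  simp only [endsSep_true buf c hS, if_true, slice_concat', pyget_concat']
  simp only [ne_eq, ofList_eq_empty_iff, labelFor_eq, hrel]

theorem emit_last_chunk (label relabel : String) (hrel : relabel = bRelabel label)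
    (st : List String × List String) (buf : List Char) (k : Nat)
    (h : ∀ b ∈ buf, pvSeps.contains b = false) :
    aEmitChunk label st ((k : Int), String.ofList buf)
      = if buf ≠ [] then (st.1 ++ [String.ofList buf], st.2 ++ [if k == 0 then label else relabel]) else st := by
  unfold aEmitChunk
  rw [endsSep_false buf h]
  simp only [Bool.false_eq_true, if_false, ne_eq, ofList_eq_empty_iff, labelFor_eq, hrel]

theorem scan_eq (label relabel : String) (hrel : relabel = bRelabel label) :
    ∀ (l buf : List Char) (k : Nat) (st : List String × List String),
    (∀ b ∈ buf, pvSeps.contains b = false) →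
    bFlush label relabel (l.foldl (bCharStep label relabel) ((st.1, st.2), buf, k))
      = (PySem.List.enumerate
          (((tokP (pvSeps.contains ·) l).modifyHead (buf ++ ·)).map String.ofList) (k : Int)).foldl
          (aEmitChunk label) st := by
  intro l
  induction l with
  | nil =>
    intro buf k st h
    simp only [List.foldl_nil, tokP, List.modifyHead_cons, List.map_cons, List.map_nil]
    rw [enumerate_cons, enumerate_nil]
    simp only [List.append_nil, List.foldl_cons, List.foldl_nil]
    rw [emit_last_chunk label relabel hrel st buf k h]
    by_cases hbuf : buf = [] <;> simp [bFlush, hbuf]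
  | cons c l' ih =>
    intro buf k st h
    by_cases hS : pvSeps.contains c = true
    · -- separator character
      simp only [List.foldl_cons]
      rw [show bCharStep label relabel ((st.1, st.2), buf, k) c
            = ((((if buf ≠ [] then (st.1 ++ [String.ofList buf], st.2 ++ [if k == 0 then label else relabel]) else (st.1, st.2)).1
                  ++ [String.ofList [c]],
                 (if buf ≠ [] then (st.1 ++ [String.ofList buf], st.2 ++ [if k == 0 then label else relabel]) else (st.1, st.2)).2
                  ++ ["O"])), [], k + 1) from by
        simp only [bCharStep, bSep_eq', hS, if_true]]
      have hIH := ih [] (k + 1)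
        ((if buf ≠ [] then (st.1 ++ [String.ofList buf], st.2 ++ [if k == 0 then label else relabel]) else (st.1, st.2)).1
            ++ [String.ofList [c]],
         (if buf ≠ [] then (st.1 ++ [String.ofList buf], st.2 ++ [if k == 0 then label else relabel]) else (st.1, st.2)).2
            ++ ["O"]) (by simp)
      rw [show (tokP (pvSeps.contains ·) l').modifyHead (fun t => [] ++ t) = tokP (pvSeps.contains ·) l' from by
        rw [show (fun t : List Char => [] ++ t) = id from funext fun t => by simp, List.modifyHead_id, id]] at hIH
      rw [show tokP (pvSeps.contains ·) (c :: l') = [c] :: tokP (pvSeps.contains ·) l' from by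
        simp only [tokP]; rw [if_pos hS]]
      simp only [List.modifyHead_cons, List.map_cons]
      rw [enumerate_cons]
      simp only [List.foldl_cons]
      rw [emit_sep_chunk label relabel hrel st buf c k hS]
      rw [show ((k : Int) + 1) = ((k + 1 : Nat) : Int) from by push_cast; ring]
      rw [← hIH]
    · -- ordinary character
      have hS' : pvSeps.contains c = false := by simpa using hS
      simp only [List.foldl_cons]
      rw [show bCharStep label relabel ((st.1, st.2), buf, k) c = ((st.1, st.2), buf ++ [c], k) from by
        simp only [bCharStep, bSep_eq', hS']; simp]
      have hbuf' : ∀ b ∈ buf ++ [c], pvSeps.contains b = false := by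
        intro b hb
        rcases List.mem_append.mp hb with hb | hb
        · exact h b hb
        · simp at hb; subst hb; exact hS'
      rw [ih (buf ++ [c]) k st hbuf']
      rw [show tokP (pvSeps.contains ·) (c :: l')
            = (tokP (pvSeps.contains ·) l').modifyHead (c :: ·) from by
        simp only [tokP]; rw [if_neg (by rw [hS']; simp)]]
      rw [List.modifyHead_modifyHead,
        show ((fun x => buf ++ x) ∘ (fun x : List Char => c :: x)) = (fun x : List Char => (buf ++ [c]) ++ x) from
          funext fun t => by simp]

theorem guard_eq (w : String) : aGuard w = w.toList.any (fun ch => bGuardSeps.contains ch) := by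
  have hb : bGuardSeps = pvSeps := by decide
  rw [hb, Bool.eq_iff_iff]
  simp [aGuard, MODEL, PySem.Str.isIn, PySem.Chars.isIn_iff_infix, List.any_eq_true, pvSeps,
    List.singleton_infix_iff]
  constructor
  · rintro (((((((((((((h|h)|h)|h)|h)|h)|h)|h)|h)|h)|h)|h)|h)|h) <;> exact ⟨_, h, by simp⟩
  · rintro ⟨x, hx, (rfl|rfl|rfl|rfl|rfl|rfl|rfl|rfl|rfl|rfl|rfl|rfl|rfl|rfl)⟩ <;> simp [hx]

theorem word_eq (st : List String × List String) (wl : String × String) :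
    aWordStep st wl = bWordStep st wl := by
  unfold aWordStep bWordStep
  rw [guard_eq wl.1]
  by_cases hg : (wl.1.toList.any fun ch => bGuardSeps.contains ch) = true
  · rw [if_pos hg, if_neg (by simpa using hg)]
    have hsc := scan_eq wl.2 (bRelabel wl.2) rfl wl.1.toList [] 0 st (by simp)
    rw [show (tokP (pvSeps.contains ·) wl.1.toList).modifyHead (fun t => [] ++ t)
          = tokP (pvSeps.contains ·) wl.1.toList from by
      rw [show (fun t : List Char => [] ++ t) = id from funext fun t => by simp, List.modifyHead_id, id]] at hsc
    rw [Nat.cast_zero] at hsc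
    rw [aTemp_eq wl.1]
    exact hsc.symm
  · rw [if_neg hg, if_pos (by simpa using hg)]

-- ===== VERDICT (by name: the statement is the Claim_ definition above) =====
theorem separate_special_characters_with_labels_spec : Claim_equal_separate_special_characters_with_labels := by
  intro sentences sentence_labels _
  unfold Spec_separate_special_characters_with_labels
  unfold separate_special_characters_with_labels separate_special_characters_with_labels_alt
  have hw : aWordStep = bWordStep := funext fun st => funext fun wl => word_eq st wl
  have hs : aSentStep = bSentStep := by
    funext st wls
    unfold aSentStep bSentStep
    rw [hw]
  rw [hs]
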